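-- pv_equiv track=rewrite | github.com/pypi-data/pypi-mirror-271 | packages/All-in-one-chay/All_in_one_chay-3.0.0-py3-none-any.whl/All-in-one_chayLichenyi/module/xiaogongju.py | daorxiao
-- ===== SOURCE A (Python) =====
-- def daorxiao(args:str,mode:int) ->str:
--     zongzifu = []
--     zifu2=""
--     gongneng1 = mode
--     if gongneng1 == 1:
--         for i in args:
--             if ord(i)>=65 and ord(i)<=90:
--                 zifu = i
--                 zifu1 = chr(ord(zifu) + 32)
--                 zongzifu.append(zifu1)
--             else:
--                 zongzifu.append(i)
--         for i in zongzifu: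
--             zifu2 += i
--         return zifu2
--     elif gongneng1 == 2:
--         for i in args:
--             if ord(i)>=97 and ord(i)<=122:
--                 zifu = i
--                 zifu1 = chr(ord(zifu) - 32)
--                 zongzifu.append(zifu1)
--             else:
--                 zongzifu.append(i)
--         for i in zongzifu:
--             zifu2 += i
--         return zifu2
--     else:
--         raise TypeError("TypeError:模式错误！")
-- ===== SOURCE B (Python) =====
-- def daorxiao(args: str, mode: int) -> str:
--     if mode == 1:
--         table = {c: c + 32 for c in range(65, 91)}
--     elif mode == 2:
--         table = {c: c - 32 for c in range(97, 123)}
--     else: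
--         raise TypeError("TypeError:模式错误！")
--     return args.translate(table)
-- ===== Notes on version B (the rewrite author's own statement) =====
-- stated objective: idiomatic
-- what changed: B validates the mode up front and replaces A's per-character branch loops plus string-concatenation pass with a precomputed code-point translation table (a dict over the single affected ASCII range) applied via str.translate in one pass.
import Mathlib
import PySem

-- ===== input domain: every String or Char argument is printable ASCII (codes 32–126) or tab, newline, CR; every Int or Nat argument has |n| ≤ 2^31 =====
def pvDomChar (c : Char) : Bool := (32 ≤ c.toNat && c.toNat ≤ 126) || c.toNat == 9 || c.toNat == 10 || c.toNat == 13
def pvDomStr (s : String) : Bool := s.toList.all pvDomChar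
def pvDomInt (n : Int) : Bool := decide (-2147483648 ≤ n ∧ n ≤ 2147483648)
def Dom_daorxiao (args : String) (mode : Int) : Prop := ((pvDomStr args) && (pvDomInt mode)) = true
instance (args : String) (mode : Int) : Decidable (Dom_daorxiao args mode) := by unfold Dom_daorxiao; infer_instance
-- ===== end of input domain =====

-- B validates the mode, then does one table-driven pass (dict over the affected ASCII code range + str.translate)
-- instead of A's per-character branch loops and concatenation pass; same speed class, more idiomatic.
-- Outside Pre_ (mode ∉ {1, 2}) both Pythons raise TypeError; the ports return "" there.

-- ===== PORT A =====
def daorxiao (args : String) (mode : Int) : String :=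
  let gongneng1 := mode
  if gongneng1 == 1 then
    let zongzifu := args.toList.foldl (fun acc i =>
      if 65 ≤ i.toNat ∧ i.toNat ≤ 90 then acc ++ [Char.ofNat (i.toNat + 32)]
      else acc ++ [i]) ([] : List Char)
    let zifu2 := zongzifu.foldl (fun s i => s ++ [i]) ([] : List Char)
    String.mk zifu2
  else if gongneng1 == 2 then
    let zongzifu := args.toList.foldl (fun acc i =>
      if 97 ≤ i.toNat ∧ i.toNat ≤ 122 then acc ++ [Char.ofNat (i.toNat - 32)]
      else acc ++ [i]) ([] : List Char)
    let zifu2 := zongzifu.foldl (fun s i => s ++ [i]) ([] : List Char)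
    String.mk zifu2
  else ""  -- Python raises TypeError here; excluded by Pre_

-- ===== PORT B =====
def daorxiao_alt (args : String) (mode : Int) : String :=
  if mode == 1 then
    let table := (PySem.List.pyRange 65 91 1).foldl
      (fun d c => d.insert c (c + 32)) (PySem.Dict.empty : PySem.Dict Int Int)
    String.mk (args.toList.map (fun ch =>
      match table.get? (ch.toNat : Int) with
      | some v => Char.ofNat v.toNat
      | none => ch))
  else if mode == 2 then
    let table := (PySem.List.pyRange 97 123 1).foldl
      (fun d c => d.insert c (c - 32)) (PySem.Dict.empty : PySem.Dict Int Int)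
    String.mk (args.toList.map (fun ch =>
      match table.get? (ch.toNat : Int) with
      | some v => Char.ofNat v.toNat
      | none => ch))
  else ""  -- Python raises TypeError here; excluded by Pre_

-- ===== PRECONDITION & SPEC =====
-- Pre_ excludes exactly the modes on which A (and B) raise TypeError.
def Pre_daorxiao (args : String) (mode : Int) : Prop := mode = 1 ∨ mode = 2
instance (args : String) (mode : Int) : Decidable (Pre_daorxiao args mode) := by unfold Pre_daorxiao; infer_instance
def pvWitness_daorxiao : String × Int := ("Ab c!", 1)
def Spec_daorxiao (args : String) (mode : Int) (out : String) : Prop := out = daorxiao_alt args mode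
instance (args : String) (mode : Int) (out : String) : Decidable (Spec_daorxiao args mode out) := by unfold Spec_daorxiao; infer_instance

-- ===== CLAIM (what is proved, stated in full; the proofs are below) =====
def Claim_equal_daorxiao : Prop := ∀ (args : String) (mode : Int), Dom_daorxiao args mode → Pre_daorxiao args mode → Spec_daorxiao args mode (daorxiao args mode)

-- ===== LEMMAS AND PROOFS =====

-- A's branch-per-char fold is a map of the conditional substitution
theorem pv_foldA (P : Char → Prop) [DecidablePred P] (g : Char → Char) :
    ∀ (l : List Char) (acc : List Char),
    l.foldl (fun acc i => if P i then acc ++ [g i] else acc ++ [i]) acc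
      = acc ++ l.map (fun i => if P i then g i else i) := by
  intro l
  induction l with
  | nil => simp
  | cons a l ih =>
    intro acc
    rw [List.foldl_cons]
    by_cases h : P a <;> simp [h, ih]

-- a fold appending one element per item is a map
theorem pv_foldl_app {α β : Type} (f : List β → α → List β) (g : α → β)
    (hf : ∀ acc i, f acc i = acc ++ [g i]) : ∀ (l : List α) (acc : List β),
    l.foldl f acc = acc ++ l.map g := by
  intro l
  induction l with
  | nil => simp
  | cons a l ih => intro acc; rw [List.foldl_cons, hf, ih]; simp

-- lookup in a table built by inserting f c for each c of a key list
theorem pv_get?_foldl_insert (f : Int → Int) : ∀ (l : List Int) (d : PySem.Dict Int Int) (n : Int),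
    (l.foldl (fun d c => d.insert c (f c)) d).get? n = if n ∈ l then some (f n) else d.get? n := by
  intro l
  induction l with
  | nil => simp
  | cons a l ih =>
    intro d n
    simp only [List.foldl_cons, ih, List.mem_cons]
    by_cases hn : n ∈ l
    · simp [hn]
    · by_cases ha : n = a
      · simp [hn, ha, PySem.Dict.get?_insert]
      · simp [hn, ha, PySem.Dict.get?_insert]

-- ===== VERDICT (by name: the statement is the Claim_ definition above) =====
theorem daorxiao_spec : Claim_equal_daorxiao := by
  intro args mode _ hpre
  unfold Spec_daorxiao
  rcases hpre with h | h <;> subst h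
  · simp only [daorxiao, daorxiao_alt]
    rw [if_pos (by decide), if_pos (by decide)]
    rw [pv_foldA (fun i => 65 ≤ i.toNat ∧ i.toNat ≤ 90) (fun i => Char.ofNat (i.toNat + 32)),
        pv_foldl_app _ (fun i => i) (fun _ _ => rfl), List.nil_append, List.nil_append, List.map_id']
    congr 1
    apply List.map_congr_left
    intro ch _
    rw [pv_get?_foldl_insert]
    simp only [PySem.List.mem_pyRange_one]
    by_cases hc : 65 ≤ ch.toNat ∧ ch.toNat ≤ 90
    · rw [if_pos (by omega), if_pos (by push_cast; omega)]
      show Char.ofNat (ch.toNat + 32) = Char.ofNat (((ch.toNat : Int) + 32).toNat)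
      congr 1 <;> omega
    · rw [if_neg (by omega), if_neg (by push_cast; omega)]
      simp [PySem.Dict.get?_empty]
  · simp only [daorxiao, daorxiao_alt]
    rw [if_neg (by decide), if_pos (by decide), if_neg (by decide), if_pos (by decide)]
    rw [pv_foldA (fun i => 97 ≤ i.toNat ∧ i.toNat ≤ 122) (fun i => Char.ofNat (i.toNat - 32)),
        pv_foldl_app _ (fun i => i) (fun _ _ => rfl), List.nil_append, List.nil_append, List.map_id']
    congr 1
    apply List.map_congr_left
    intro ch _
    rw [pv_get?_foldl_insert]
    simp only [PySem.List.mem_pyRange_one]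
    by_cases hc : 97 ≤ ch.toNat ∧ ch.toNat ≤ 122
    · rw [if_pos (by omega), if_pos (by push_cast; omega)]
      show Char.ofNat (ch.toNat - 32) = Char.ofNat (((ch.toNat : Int) - 32).toNat)
      congr 1 <;> omega
    · rw [if_neg (by omega), if_neg (by push_cast; omega)]
      simp [PySem.Dict.get?_empty]
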